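-- pv_equiv track=rewrite | github.com/LukhasAI/Lukhas | consent/service.py | _calculate_effective_ttl
-- ===== SOURCE A (Python) =====
-- def _calculate_effective_ttl(scope_levels: list[str], requested_ttl: int) -> int:
--     """Calculate effective TTL based on scope security levels"""
--     max_level = "metadata"
--
--     for level in scope_levels:
--         if level == "admin":
--             max_level = "admin"
--             break
--         elif level == "content" and max_level == "metadata":
--             max_level = "content"
--
--     # Enforce security limits based on scope level
--     if max_level == "admin":
--         return min(requested_ttl, 5)  # Max 5 minutes for admin
--     elif max_level == "content":
--         return min(requested_ttl, 30)  # Max 30 minutes for content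
--     else:
--         return min(requested_ttl, 240)  # Max 4 hours for metadata
-- ===== SOURCE B (Python) =====
-- _CAPS = {"admin": 5, "content": 30}
--
-- def _calculate_effective_ttl(scope_levels: list[str], requested_ttl: int) -> int:
--     cap = min((_CAPS.get(level, 240) for level in scope_levels), default=240)
--     return min(requested_ttl, cap)
-- ===== Notes on version B (the rewrite author's own statement) =====
-- stated objective: alternative
-- what changed: Replaced the stateful max_level accumulator loop with break and its branch chain by a map-reduce: each level is mapped to its numeric cap (admin=5, content=30, other=240) and the minimum is taken, the admin>content>metadata precedence emerging from the numeric order 5<30<240 instead of control flow.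
import Mathlib
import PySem

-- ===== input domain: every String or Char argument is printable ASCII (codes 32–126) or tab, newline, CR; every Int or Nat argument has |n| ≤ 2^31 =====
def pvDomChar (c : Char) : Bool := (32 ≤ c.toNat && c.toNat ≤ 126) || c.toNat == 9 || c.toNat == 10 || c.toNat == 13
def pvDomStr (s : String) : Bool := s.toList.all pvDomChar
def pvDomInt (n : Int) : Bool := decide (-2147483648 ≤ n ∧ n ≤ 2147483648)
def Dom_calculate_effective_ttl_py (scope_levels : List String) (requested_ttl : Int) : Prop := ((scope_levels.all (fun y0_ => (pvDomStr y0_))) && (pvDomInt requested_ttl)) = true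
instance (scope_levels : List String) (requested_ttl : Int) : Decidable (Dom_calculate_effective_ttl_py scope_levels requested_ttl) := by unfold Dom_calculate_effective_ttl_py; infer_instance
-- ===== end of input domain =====

-- B replaces A's stateful flag loop with break by a map-to-numeric-cap + min reduction (precedence via 5 < 30 < 240); alternative decomposition, same cost.

-- ===== PORT A =====
-- the for-loop over scope_levels with state max_level and an early break on "admin"
def calc_ttl_loopA : List String → String → String
  | [], maxLevel => maxLevel
  | level :: rest, maxLevel =>
    if level = "admin" then "admin"   -- break: loop ends, max_level = "admin"
    else if level = "content" ∧ maxLevel = "metadata" then calc_ttl_loopA rest "content"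
    else calc_ttl_loopA rest maxLevel

def calculate_effective_ttl_py (scope_levels : List String) (requested_ttl : Int) : Int :=
  let maxLevel := calc_ttl_loopA scope_levels "metadata"
  if maxLevel = "admin" then min requested_ttl 5
  else if maxLevel = "content" then min requested_ttl 30
  else min requested_ttl 240

-- ===== PORT B =====
-- _CAPS.get(level, 240)
def calc_ttl_capB (level : String) : Int :=
  PySem.Dict.getD (PySem.Dict.ofList [("admin", (5 : Int)), ("content", 30)]) level 240

-- min((_CAPS.get(level, 240) for level in scope_levels), default=240): a fold of min over the mapped caps, starting from the default
def calculate_effective_ttl_py_alt (scope_levels : List String) (requested_ttl : Int) : Int :=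
  let cap : Int := (scope_levels.map calc_ttl_capB).foldl min 240
  min requested_ttl cap

-- ===== PRECONDITION & SPEC =====
def Spec_calculate_effective_ttl_py (scope_levels : List String) (requested_ttl : Int) (out : Int) : Prop := out = calculate_effective_ttl_py_alt scope_levels requested_ttl
instance (scope_levels : List String) (requested_ttl : Int) (out : Int) : Decidable (Spec_calculate_effective_ttl_py scope_levels requested_ttl out) := by unfold Spec_calculate_effective_ttl_py; infer_instance

-- ===== CLAIM =====
def Claim_equal_calculate_effective_ttl_py : Prop := ∀ (scope_levels : List String) (requested_ttl : Int), Dom_calculate_effective_ttl_py scope_levels requested_ttl → Spec_calculate_effective_ttl_py scope_levels requested_ttl (calculate_effective_ttl_py scope_levels requested_ttl)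

-- ===== LEMMAS AND PROOFS =====
theorem capB_eq (l : String) :
    calc_ttl_capB l = if l = "admin" then 5 else if l = "content" then 30 else 240 := by
  by_cases h : l = "admin"
  · simp [calc_ttl_capB, h, PySem.Dict.getD, PySem.Dict.get?, PySem.Dict.ofList, PySem.Dict.empty,
      PySem.Dict.update, PySem.Dict.insert]
  · have ha : ("admin" == l) = false := by simpa using fun e => h e.symm
    by_cases h2 : l = "content"
    · simp [calc_ttl_capB, h2, PySem.Dict.getD, PySem.Dict.get?, PySem.Dict.ofList,
        PySem.Dict.empty, PySem.Dict.update, PySem.Dict.insert, List.find?]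
    · have hc : ("content" == l) = false := by simpa using fun e => h2 e.symm
      simp [calc_ttl_capB, h, h2, ha, hc, PySem.Dict.getD, PySem.Dict.get?, PySem.Dict.ofList,
        PySem.Dict.empty, PySem.Dict.update, PySem.Dict.insert, List.find?]

-- the "minimum cap" of a list of levels, in closed form
def minCap (ls : List String) : Int :=
  if ls.contains "admin" then 5 else if ls.contains "content" then 30 else 240

theorem minCap_cons (l : String) (rest : List String) :
    minCap (l :: rest) = min (calc_ttl_capB l) (minCap rest) := by
  rw [capB_eq]
  simp only [minCap, List.contains_cons]
  by_cases h : l = "admin"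
  · simp [h]; split_ifs <;> omega
  · have ha : ("admin" == l) = false := by simpa using fun e => h e.symm
    by_cases h2 : l = "content"
    · simp [h2]; split_ifs <;> omega
    · have hc : ("content" == l) = false := by simpa using fun e => h2 e.symm
      simp [h, h2, ha, hc]; split_ifs <;> omega

theorem fold_capB (ls : List String) (a : Int) (h2 : a ≤ 240) :
    (ls.map calc_ttl_capB).foldl min a = min a (minCap ls) := by
  induction ls generalizing a with
  | nil => simp [minCap]; omega
  | cons l rest ih =>
    simp only [List.map_cons, List.foldl_cons]
    rw [minCap_cons]
    have hcap : calc_ttl_capB l ≤ 240 := by rw [capB_eq]; split_ifs <;> omega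
    rw [ih (min a (calc_ttl_capB l)) (by omega)]
    omega

theorem loopA_content (ls : List String) :
    calc_ttl_loopA ls "content" = if ls.contains "admin" then "admin" else "content" := by
  induction ls with
  | nil => simp [calc_ttl_loopA]
  | cons l rest ih =>
    simp only [calc_ttl_loopA, List.contains_cons]
    by_cases h : l = "admin"
    · simp [h]
    · simp [h, Ne.symm h, ih]

theorem loopA_char (ls : List String) :
    calc_ttl_loopA ls "metadata" =
      if ls.contains "admin" then "admin"
      else if ls.contains "content" then "content" else "metadata" := by
  induction ls with
  | nil => simp [calc_ttl_loopA]
  | cons l rest ih =>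
    simp only [calc_ttl_loopA, List.contains_cons]
    by_cases h : l = "admin"
    · simp [h]
    · by_cases hc : l = "content"
      · simp [hc, loopA_content rest]
      · simp [h, Ne.symm h, hc, Ne.symm hc, ih]

-- ===== VERDICT =====
theorem calculate_effective_ttl_py_spec : Claim_equal_calculate_effective_ttl_py := by
  intro scope_levels requested_ttl _
  unfold Spec_calculate_effective_ttl_py calculate_effective_ttl_py calculate_effective_ttl_py_alt
  rw [fold_capB scope_levels 240 le_rfl]
  rw [loopA_char scope_levels]
  unfold minCap
  split_ifs <;> simp_all
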